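-- pv_equiv track=rewrite | github.com/aaaron27/SimulacionTareas | tarea3/evaluator.py | calc_frecuencias_enteros
-- ===== SOURCE A (Python) =====
-- def calc_frecuencias_enteros(sec, simbolos, max_hueco=100):
--     res = [[0 for _ in simbolos] for _ in range(max_hueco)]
--
--     for idx, simbolo in enumerate(simbolos):
--         pos = [i for i, x in enumerate(sec) if x == simbolo]
--
--         for i in range(len(pos) - 1):
--             c = pos[i+1] - pos[i] - 1
--             if c < max_hueco:
--                 res[c][idx] += 1
--
--     return res
-- ===== SOURCE B (Python) =====
-- def calc_frecuencias_enteros(sec, simbolos, max_hueco=100):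
--     # One pass over sec builds an index symbol -> list of positions, instead of
--     # rescanning sec once per symbol; gaps then come from pairwise zipping.
--     posiciones = {}
--     for i, x in enumerate(sec):
--         posiciones.setdefault(x, []).append(i)
--
--     res = [[0] * len(simbolos) for _ in range(max_hueco)]
--     for idx, simbolo in enumerate(simbolos):
--         pos = posiciones.get(simbolo, [])
--         for p, q in zip(pos, pos[1:]):
--             c = q - p - 1
--             if c < max_hueco:
--                 res[c][idx] += 1
--     return res
-- ===== Notes on version B (the rewrite author's own statement) =====
-- stated objective: faster
-- what changed: B builds a symbol->positions index in one pass over sec (dict with setdefault) and reads gaps by zipping each position list pairwise, instead of A's rescan of the whole sequence once per symbol.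
import Mathlib
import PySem

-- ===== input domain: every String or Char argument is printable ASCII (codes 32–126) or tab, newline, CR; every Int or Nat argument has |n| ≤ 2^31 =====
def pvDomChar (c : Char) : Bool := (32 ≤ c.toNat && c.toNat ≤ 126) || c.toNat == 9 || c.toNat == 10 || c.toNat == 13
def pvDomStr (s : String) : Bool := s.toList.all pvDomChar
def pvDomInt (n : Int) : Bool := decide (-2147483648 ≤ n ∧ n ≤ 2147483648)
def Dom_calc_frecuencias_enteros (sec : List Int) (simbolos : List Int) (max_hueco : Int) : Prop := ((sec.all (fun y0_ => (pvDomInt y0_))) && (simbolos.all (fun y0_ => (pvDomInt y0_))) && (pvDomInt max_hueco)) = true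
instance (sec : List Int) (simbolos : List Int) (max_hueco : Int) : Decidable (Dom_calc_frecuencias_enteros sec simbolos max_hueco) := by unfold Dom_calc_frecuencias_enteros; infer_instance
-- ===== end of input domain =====

-- B replaces A's per-symbol rescan of sec by ONE pass building a positions index
-- (dict symbol -> positions) and pairwise-zips each position list; objective: faster.

-- ===== PORT A =====
def calc_frecuencias_enteros (sec : List Int) (simbolos : List Int) (max_hueco : Int) : List (List Int) :=
  let res0 := (PySem.List.pyRange 0 max_hueco 1).map (fun _ => simbolos.map (fun _ => (0 : Int)))
  (PySem.List.enumerate simbolos).foldl (fun res p =>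
    let pos := ((PySem.List.enumerate sec).filter (fun q => q.2 == p.2)).map (fun q => q.1)
    (PySem.List.pyRange 0 (PySem.List.len pos - 1) 1).foldl (fun res i =>
      let c := PySem.List.pyGetD pos (i + 1) 0 - PySem.List.pyGetD pos i 0 - 1
      if c < max_hueco then
        PySem.List.pySetD res c
          (PySem.List.pySetD (PySem.List.pyGetD res c [])
            p.1 (PySem.List.pyGetD (PySem.List.pyGetD res c []) p.1 0 + 1))
      else res) res) res0

-- ===== PORT B =====
def calc_frecuencias_enteros_alt (sec : List Int) (simbolos : List Int) (max_hueco : Int) : List (List Int) :=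
  let posiciones : PySem.Dict Int (List Int) :=
    (PySem.List.enumerate sec).foldl (fun d q => PySem.Dict.modify d q.2 [] (· ++ [q.1])) PySem.Dict.empty
  let res0 := (PySem.List.pyRange 0 max_hueco 1).map (fun _ => PySem.List.pyRepeat [(0 : Int)] (PySem.List.len simbolos))
  (PySem.List.enumerate simbolos).foldl (fun res p =>
    let pos := PySem.Dict.getD posiciones p.2 []
    (pos.zip (PySem.List.slice pos (some 1) none)).foldl (fun res pq =>
      let c := pq.2 - pq.1 - 1
      if c < max_hueco then
        PySem.List.pySetD res c
          (PySem.List.pySetD (PySem.List.pyGetD res c [])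
            p.1 (PySem.List.pyGetD (PySem.List.pyGetD res c []) p.1 0 + 1))
      else res) res) res0

-- ===== PRECONDITION & SPEC =====
def Spec_calc_frecuencias_enteros (sec : List Int) (simbolos : List Int) (max_hueco : Int) (out : List (List Int)) : Prop := out = calc_frecuencias_enteros_alt sec simbolos max_hueco
instance (sec : List Int) (simbolos : List Int) (max_hueco : Int) (out : List (List Int)) : Decidable (Spec_calc_frecuencias_enteros sec simbolos max_hueco out) := by unfold Spec_calc_frecuencias_enteros; infer_instance

-- ===== CLAIM (what is proved, stated in full; the proofs are below) =====
def Claim_equal_calc_frecuencias_enteros : Prop := ∀ (sec : List Int) (simbolos : List Int) (max_hueco : Int), Dom_calc_frecuencias_enteros sec simbolos max_hueco → Spec_calc_frecuencias_enteros sec simbolos max_hueco (calc_frecuencias_enteros sec simbolos max_hueco)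

-- ===== LEMMAS AND PROOFS =====

-- the one-pass dict of positions looks up to exactly A's filtered position list
theorem getD_posiciones (sec : List Int) (s : Int) :
    PySem.Dict.getD ((PySem.List.enumerate sec).foldl
      (fun d q => PySem.Dict.modify d q.2 [] (· ++ [q.1])) PySem.Dict.empty) s []
      = ((PySem.List.enumerate sec).filter (fun q => q.2 == s)).map (fun q => q.1) := by
  have h : (PySem.List.enumerate sec).foldl
      (fun d q => PySem.Dict.modify d q.2 [] (· ++ [q.1])) PySem.Dict.empty
      = ((PySem.List.enumerate sec).map (fun q => (q.2, q.1))).foldl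
          (fun d p => PySem.Dict.modify d p.1 [] (· ++ [p.2])) PySem.Dict.empty := by
    rw [List.foldl_map]
  rw [h, PySem.Dict.getD_foldl_modify_append, List.filter_map, PySem.Dict.getD_empty]
  simp [List.map_map, Function.comp_def]

-- zip(pos, pos[1:]) is the list of (pos[i], pos[i+1]) for i in range(len(pos)-1)
theorem zip_tail_eq_map_pyRange (pos : List Int) :
    pos.zip (PySem.List.slice pos (some 1) none)
      = (PySem.List.pyRange 0 (PySem.List.len pos - 1) 1).map
          (fun i => (PySem.List.pyGetD pos i 0, PySem.List.pyGetD pos (i + 1) 0)) := by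
  rw [PySem.List.slice_from_one, PySem.List.len_eq, PySem.List.pyRange_one]
  have hn : ((pos.length : Int) - 1 - 0).toNat = pos.length - 1 := by omega
  rw [hn, List.map_map]
  apply List.ext_getElem
  · simp [List.length_zip, List.length_tail]
  · intro i h1 h2
    simp only [List.length_zip, List.length_tail] at h1
    have hi : i < pos.length - 1 := by omega
    have hi1 : i + 1 < pos.length := by omega
    simp only [List.getElem_zip, List.getElem_map, List.getElem_range, List.getElem_tail,
      Function.comp_apply]
    rw [show (0 : Int) + (i : Int) = ((i : Nat) : Int) by omega]
    rw [show ((i : Nat) : Int) + 1 = (((i + 1 : Nat)) : Int) by push_cast; ring]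
    rw [PySem.List.pyGetD_natCast, PySem.List.pyGetD_natCast,
        List.getD_eq_getElem _ _ (by omega), List.getD_eq_getElem _ _ hi1]

theorem grid_init (simbolos : List Int) :
    simbolos.map (fun _ => (0 : Int)) = PySem.List.pyRepeat [(0 : Int)] (PySem.List.len simbolos) := by
  simp [PySem.List.pyRepeat_singleton, PySem.List.len_eq, List.map_const']

-- ===== VERDICT (by name: the statement is the Claim_ definition above) =====
theorem calc_frecuencias_enteros_spec : Claim_equal_calc_frecuencias_enteros := by
  intro sec simbolos max_hueco _
  unfold Spec_calc_frecuencias_enteros calc_frecuencias_enteros calc_frecuencias_enteros_alt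
  simp only [getD_posiciones, zip_tail_eq_map_pyRange, grid_init, List.foldl_map]
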